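-- pv_equiv track=rewrite | github.com/LucaPiccone/cs50-cs50web | dna.py | count_dna
-- ===== SOURCE A (Python) =====
-- def count_dna(sample, dna):
--     # Length of nucleotide and sample
--     nuc_len = len(dna)
--     samp_len = len(sample)
--     # The final count.
--     final_count = 0
--     # from start of sample to end of sample
--     for i in range(0, samp_len):
--         count = 0
--         # If dna is in sample[nucleotide length]
--         if dna == sample[i:i+nuc_len]:
--             # from that point count every nucleotide length
--             for j in range(i, samp_len, nuc_len):
--                 # if dna is in the nucleotide length of sample
--                 if dna == sample[j:j+nuc_len]:
--                     count += 1
--                     # If count is larger than final count.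
--                     if count > final_count:
--                         final_count = count
--                 else:
--                     break
--     return final_count
-- ===== SOURCE B (Python) =====
-- def count_dna(sample, dna):
--     k = len(dna)
--     n = len(sample)
--     if k == 0:
--         return 0
--     run = [0] * (n + k)   # run[i] = length of the tandem run starting at position i
--     best = 0
--     for i in range(n - 1, -1, -1):
--         if sample.startswith(dna, i):
--             r = 1 + run[i + k]
--             run[i] = r
--             if r > best:
--                 best = r
--     return best
-- ===== Notes on version B (the rewrite author's own statement) =====
-- stated objective: faster
-- what changed: Replaced the nested scan (for every position, re-count the whole tandem run forward) by a single backward pass filling a run-length array via run[i] = 1 + run[i+k] (startswith instead of slice copies) while tracking the maximum.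
import Mathlib
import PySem

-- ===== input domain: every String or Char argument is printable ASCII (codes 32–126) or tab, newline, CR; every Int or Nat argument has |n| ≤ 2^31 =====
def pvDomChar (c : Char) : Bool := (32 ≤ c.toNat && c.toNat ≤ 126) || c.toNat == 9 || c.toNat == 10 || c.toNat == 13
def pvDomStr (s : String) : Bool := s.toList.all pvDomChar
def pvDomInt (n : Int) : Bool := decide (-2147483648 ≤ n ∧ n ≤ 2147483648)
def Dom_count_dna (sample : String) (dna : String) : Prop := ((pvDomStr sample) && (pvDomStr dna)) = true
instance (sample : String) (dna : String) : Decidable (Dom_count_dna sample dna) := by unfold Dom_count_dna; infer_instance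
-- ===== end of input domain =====

-- B replaces A's nested rescans by one backward pass with a k-length sliding window of run
-- lengths (run(i) = 1 + run(i+k)) and a running maximum: O(n*k) instead of O(n^2).

-- ===== PORT A =====
-- the inner 'for j in range(i, samp_len, nuc_len)' loop with its break, over the range list
def count_dna_inner (s d : List Char) (k : Int) : List Int → Int → Int → Int
  | [], _count, final_count => final_count
  | j :: js, count, final_count =>
    if PySem.List.slice s (some j) (some (j + k)) = d then
      count_dna_inner s d k js (count + 1)
        (if count + 1 > final_count then count + 1 else final_count)
    else final_count

def count_dna (sample : String) (dna : String) : Int :=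
  let nuc_len : Int := PySem.Str.len dna
  let samp_len : Int := PySem.Str.len sample
  (PySem.List.pyRange 0 samp_len 1).foldl
    (fun final_count i =>
      if PySem.List.slice sample.toList (some i) (some (i + nuc_len)) = dna.toList then
        count_dna_inner sample.toList dna.toList nuc_len
          (PySem.List.pyRange i samp_len nuc_len) 0 final_count
      else final_count) 0

-- ===== PORT B =====
-- loop body of B: if sample.startswith(dna, i): r = 1 + run[i+k]; run[i] = r; best = max(best, r)
def count_dna_alt_step (sample dna : String) (k : Int) (st : List Int × Int) (i : Int) :
    List Int × Int :=
  -- sample.startswith(dna, i): exact for 0 ≤ i, which holds for every i this loop produces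
  if dna.toList.isPrefixOf (sample.toList.drop i.toNat) then
    -- run[i + k]: always in range inside this loop, so the default is never used
    let r : Int := 1 + PySem.List.pyGetD st.1 (i + k) 0
    (st.1.set i.toNat r, if r > st.2 then r else st.2)
  else st

def count_dna_alt (sample : String) (dna : String) : Int :=
  let k : Int := PySem.Str.len dna
  let n : Int := PySem.Str.len sample
  if k = 0 then 0
  else
    ((PySem.List.pyRange (n - 1) (-1) (-1)).foldl
        (count_dna_alt_step sample dna k)
        (List.replicate (n + k).toNat 0, 0)).2

-- ===== PRECONDITION & SPEC =====
-- Pre_ excludes only dna = "" with sample ≠ "", where A raises ValueError (range() step 0).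
def Pre_count_dna (sample : String) (dna : String) : Prop := dna ≠ "" ∨ sample = ""
instance (sample : String) (dna : String) : Decidable (Pre_count_dna sample dna) := by
  unfold Pre_count_dna; infer_instance
def pvWitness_count_dna : String × String := ("AGATAGAT", "AGAT")

def Spec_count_dna (sample : String) (dna : String) (out : Int) : Prop := out = count_dna_alt sample dna
instance (sample : String) (dna : String) (out : Int) : Decidable (Spec_count_dna sample dna out) := by
  unfold Spec_count_dna; infer_instance

-- ===== CLAIM (what is proved, stated in full; the proofs are below) =====
def Claim_equal_count_dna : Prop := ∀ (sample : String) (dna : String), Dom_count_dna sample dna → Pre_count_dna sample dna → Spec_count_dna sample dna (count_dna sample dna)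


-- ===== LEMMAS AND PROOFS =====

-- the tandem-run length starting at position i (0 if no match there)
def pvRun (d s : List Char) (i : Nat) : Nat :=
  if h : d ≠ [] ∧ (s.drop i).take d.length = d then 1 + pvRun d s (i + d.length) else 0
termination_by s.length - i
decreasing_by
  have hlen := congrArg List.length h.2
  simp [List.length_take, List.length_drop] at hlen
  have hd := List.length_pos_of_ne_nil h.1
  omega

lemma pvMatch_le (d s : List Char) (i : Nat) (hd : d ≠ []) (h : (s.drop i).take d.length = d) :
    i + d.length ≤ s.length := by
  have hlen := congrArg List.length h
  simp [List.length_take, List.length_drop] at hlen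
  have hd2 := List.length_pos_of_ne_nil hd
  omega

lemma pvRun_zero_of_big (d s : List Char) (i : Nat) (hd : d ≠ []) (h : s.length < i + d.length) :
    pvRun d s i = 0 := by
  rw [pvRun, dif_neg]
  rintro ⟨h1, h2⟩
  exact absurd (pvMatch_le d s i h1 h2) (by omega)

lemma pyRange_pos_nil (a b st : Int) (hs : 0 < st) (h : b ≤ a) :
    PySem.List.pyRange a b st = [] := by
  rw [PySem.List.pyRange_of_pos _ _ hs, if_neg (by omega)]
  simp

lemma pyRange_pos_cons (a b st : Int) (hs : 0 < st) (hab : a < b) :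
    PySem.List.pyRange a b st = a :: PySem.List.pyRange (a + st) b st := by
  rw [PySem.List.pyRange_of_pos _ _ hs, PySem.List.pyRange_of_pos _ _ hs, if_pos hab]
  have key : (b - a + st - 1) / st = (b - a - 1) / st + 1 := by
    have h1 : b - a + st - 1 = (b - a - 1) + 1 * st := by ring
    rw [h1, Int.add_mul_ediv_right _ _ (by omega)]
  by_cases hab2 : a + st < b
  · rw [if_pos hab2]
    have key2 : (b - (a + st) + st - 1) / st = (b - a - 1) / st := by ring_nf
    have hnn : 0 ≤ (b - a - 1) / st := Int.ediv_nonneg (by omega) (by omega)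
    rw [key, key2]
    have h2 : ((b - a - 1) / st + 1).toNat = ((b - a - 1) / st).toNat + 1 := by omega
    rw [h2, List.range_succ_eq_map]
    simp [Function.comp, mul_add]
    intro k _
    ring
  · rw [if_neg hab2]
    have hz : (b - a - 1) / st = 0 := Int.ediv_eq_zero_of_lt (by omega) (by omega)
    rw [key, hz]
    simp

lemma inner_eq (s d : List Char) (hd : d ≠ []) (m : Nat) :
    ∀ (j : Nat) (c f : Int), s.length - j ≤ m → c ≤ f →
      count_dna_inner s d (↑d.length) (PySem.List.pyRange (↑j) (↑s.length) (↑d.length)) c f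
        = max f (c + ↑(pvRun d s j)) := by
  induction m with
  | zero =>
    intro j c f hm hcf
    have hj : s.length ≤ j := by omega
    have hd' := List.length_pos_of_ne_nil hd
    rw [pyRange_pos_nil _ _ _ (by exact_mod_cast hd') (by exact_mod_cast hj)]
    rw [pvRun_zero_of_big d s j hd (by omega)]
    simp [count_dna_inner]
    omega
  | succ m ih =>
    intro j c f hm hcf
    have hd' := List.length_pos_of_ne_nil hd
    by_cases hj : s.length ≤ j
    · rw [pyRange_pos_nil _ _ _ (by exact_mod_cast hd') (by exact_mod_cast hj)]
      rw [pvRun_zero_of_big d s j hd (by omega)]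
      simp [count_dna_inner]
      omega
    · rw [not_le] at hj
      rw [pyRange_pos_cons _ _ _ (by exact_mod_cast hd') (by exact_mod_cast hj)]
      rw [count_dna_inner]
      rw [PySem.List.slice_natCast_add]
      by_cases hmatch : (s.drop j).take d.length = d
      · rw [if_pos hmatch]
        have hcast : ((j : Int) + (d.length : Int)) = ((j + d.length : Nat) : Int) := by
          push_cast; ring
        rw [hcast]
        rw [ih (j + d.length) (c + 1) (if c + 1 > f then c + 1 else f) (by omega)
          (by split_ifs <;> omega)]
        conv_rhs => rw [pvRun]
        rw [dif_pos ⟨hd, hmatch⟩]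
        push_cast
        split_ifs <;> omega
      · rw [if_neg hmatch]
        conv_rhs => rw [pvRun]
        rw [dif_neg (by rintro ⟨_, h2⟩; exact hmatch h2)]
        omega

lemma outer_fold (s d : List Char) (hd : d ≠ []) :
    ∀ (l : List Nat) (f : Int), 0 ≤ f →
      ((l.map (fun j : Nat => (j : Int))).foldl
        (fun final_count i =>
          if PySem.List.slice s (some i) (some (i + (↑d.length : Int))) = d then
            count_dna_inner s d (↑d.length) (PySem.List.pyRange i (↑s.length) (↑d.length)) 0
              final_count
          else final_count) f)
      = l.foldl (fun acc j => max acc ((pvRun d s j : Nat) : Int)) f := by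
  intro l
  induction l with
  | nil => intro f _; rfl
  | cons a l ih =>
    intro f hf
    simp only [List.map_cons, List.foldl_cons]
    rw [PySem.List.slice_natCast_add]
    by_cases hmatch : (s.drop a).take d.length = d
    · rw [if_pos hmatch, inner_eq s d hd s.length a 0 f (by omega) hf, zero_add,
        ih _ (le_trans hf (le_max_left _ _))]
    · rw [if_neg hmatch, ih _ hf]
      conv_rhs => rw [pvRun]
      rw [dif_neg (by rintro ⟨_, h2⟩; exact hmatch h2)]
      have hmax : max f (((0 : Nat) : Int)) = f := by omega
      rw [hmax]

-- A's value is the running max of pvRun over all start positions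
lemma A_val (sample dna : String) (hd : dna.toList ≠ []) :
    count_dna sample dna
      = (List.range sample.toList.length).foldl
          (fun acc j => max acc ((pvRun dna.toList sample.toList j : Nat) : Int)) 0 := by
  simp only [count_dna, PySem.Str.len_eq]
  rw [PySem.List.pyRange_zero_nat]
  exact outer_fold sample.toList dna.toList hd (List.range sample.toList.length) 0 le_rfl

-- B's run array after the loop has processed positions n-1, n-2, …, i
def pvArr (d s : List Char) (i : Nat) : List Int :=
  (List.range (s.length + d.length)).map
    (fun j => if i ≤ j then ((pvRun d s j : Nat) : Int) else 0)

lemma pvArr_top (d s : List Char) (hd : d ≠ []) :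
    pvArr d s s.length = List.replicate (s.length + d.length) 0 := by
  have hd' := List.length_pos_of_ne_nil hd
  simp only [pvArr]
  have e : ∀ j ∈ List.range (s.length + d.length),
      (if s.length ≤ j then ((pvRun d s j : Nat) : Int) else 0) = (fun _ : Nat => (0 : Int)) j := by
    intro j _
    split_ifs with h
    · rw [pvRun_zero_of_big d s j hd (by omega)]; simp
    · rfl
  rw [List.map_congr_left e, List.map_const', List.length_range]

lemma pvArr_get (d s : List Char) (i j : Nat) (hj : j < s.length + d.length) :
    (pvArr d s i).getD j 0 = if i ≤ j then ((pvRun d s j : Nat) : Int) else 0 := by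
  simp only [pvArr]
  rw [PySem.List.getD_map_range _ _ _ _ hj]

lemma pvArr_set (d s : List Char) (i : Nat) :
    (pvArr d s (i + 1)).set i ((pvRun d s i : Nat) : Int) = pvArr d s i := by
  apply List.ext_getElem
  · simp [pvArr]
  · intro j h1 h2
    simp only [List.getElem_set, pvArr, List.getElem_map, List.getElem_range]
    by_cases hij : i = j
    · subst hij
      simp
    · rw [if_neg hij]
      split_ifs <;> first | rfl | omega

lemma pvArr_skip (d s : List Char) (i : Nat) (hm : ¬ (s.drop i).take d.length = d) :
    pvArr d s (i + 1) = pvArr d s i := by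
  simp only [pvArr]
  apply List.map_congr_left
  intro j _
  by_cases hij : i = j
  · subst hij
    rw [if_neg (by omega), if_pos le_rfl, pvRun, dif_neg (by rintro ⟨_, h2⟩; exact hm h2)]
    simp
  · split_ifs <;> first | rfl | omega

-- the startswith test equals the take-based match
lemma prefix_iff_take (d l : List Char) :
    d.isPrefixOf l = true ↔ l.take d.length = d := by
  rw [List.isPrefixOf_iff_prefix, List.prefix_iff_eq_take]
  constructor <;> (intro h; exact h.symm)

lemma B_loop (sample dna : String) (hd : dna.toList ≠ []) :
    ∀ (i : Nat) (b : Int), i ≤ sample.toList.length → 0 ≤ b →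
      (PySem.List.pyRange ((i : Int) - 1) (-1) (-1)).foldl
          (count_dna_alt_step sample dna (↑dna.toList.length))
          (pvArr dna.toList sample.toList i, b)
        = (pvArr dna.toList sample.toList 0,
            ((List.range i).reverse).foldl
              (fun acc j => max acc ((pvRun dna.toList sample.toList j : Nat) : Int)) b) := by
  intro i
  induction i with
  | zero =>
    intro b _ _
    have h0 : ((0 : Nat) : Int) - 1 = -1 := by norm_num
    rw [h0, PySem.List.pyRange_neg_one_eq_nil le_rfl]
    simp
  | succ i ih =>
    intro b hi hb
    have hd' := List.length_pos_of_ne_nil hd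
    set d := dna.toList
    set s := sample.toList
    have hcast : ((i + 1 : Nat) : Int) - 1 = (i : Int) := by push_cast; ring
    rw [hcast, PySem.List.pyRange_neg_one_cons (by omega), List.foldl_cons]
    have hstep : count_dna_alt_step sample dna (↑d.length) (pvArr d s (i + 1), b) (↑i)
        = (pvArr d s i, max b ((pvRun d s i : Nat) : Int)) := by
      simp only [count_dna_alt_step, Int.toNat_natCast]
      by_cases hm : (s.drop i).take d.length = d
      · rw [if_pos ((prefix_iff_take d (s.drop i)).mpr hm)]
        have hik : ((i : Int) + ↑d.length) = ((i + d.length : Nat) : Int) := by push_cast; ring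
        rw [hik, PySem.List.pyGetD_natCast,
          pvArr_get d s (i + 1) (i + d.length) (by omega), if_pos (by omega)]
        have hr : (1 : Int) + ((pvRun d s (i + d.length) : Nat) : Int)
            = ((pvRun d s i : Nat) : Int) := by
          conv_rhs => rw [pvRun]
          rw [dif_pos ⟨hd, hm⟩]
          push_cast
          ring
        rw [hr, pvArr_set d s i]
        have hmax : (if ((pvRun d s i : Nat) : Int) > b then ((pvRun d s i : Nat) : Int) else b)
            = max b ((pvRun d s i : Nat) : Int) := by
          split_ifs <;> omega
        rw [hmax]
      · rw [if_neg (by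
          intro hpre
          exact hm ((prefix_iff_take d (s.drop i)).mp hpre))]
        rw [pvArr_skip d s i hm]
        have h0 : pvRun d s i = 0 := by
          rw [pvRun, dif_neg (by rintro ⟨_, h2⟩; exact hm h2)]
        rw [h0]
        have hmax : max b (((0 : Nat) : Int)) = b := by
          simp only [Nat.cast_zero]
          omega
        rw [hmax]
    rw [hstep, ih (max b ((pvRun d s i : Nat) : Int)) (by omega) (by omega)]
    rw [List.range_succ, List.reverse_append]
    simp

lemma B_val (sample dna : String) (hd : dna.toList ≠ []) :
    count_dna_alt sample dna
      = ((List.range sample.toList.length).reverse).foldl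
          (fun acc j => max acc ((pvRun dna.toList sample.toList j : Nat) : Int)) 0 := by
  have hd' := List.length_pos_of_ne_nil hd
  simp only [count_dna_alt, PySem.Str.len_eq]
  rw [if_neg (by exact_mod_cast Nat.pos_iff_ne_zero.mp hd')]
  have hrep : List.replicate (((sample.toList.length : Int)) + ((dna.toList.length : Int))).toNat
        (0 : Int)
      = pvArr dna.toList sample.toList sample.toList.length := by
    rw [pvArr_top dna.toList sample.toList hd]
    have h : (((sample.toList.length : Int)) + ((dna.toList.length : Int))).toNat
        = sample.toList.length + dna.toList.length := by omega
    rw [h]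
  rw [hrep, B_loop sample dna hd sample.toList.length 0 le_rfl le_rfl]

lemma foldl_max_comm (g : Nat → Int) :
    ∀ (l : List Nat) (b c : Int),
      max (l.foldl (fun acc j => max acc (g j)) b) c
        = l.foldl (fun acc j => max acc (g j)) (max b c) := by
  intro l
  induction l with
  | nil => intro b c; rfl
  | cons a l ih =>
    intro b c
    simp only [List.foldl_cons]
    rw [ih]
    congr 1
    omega

lemma foldl_max_reverse (g : Nat → Int) :
    ∀ (l : List Nat) (b : Int),
      l.reverse.foldl (fun acc j => max acc (g j)) b = l.foldl (fun acc j => max acc (g j)) b := by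
  intro l
  induction l with
  | nil => intro b; rfl
  | cons a l ih =>
    intro b
    simp only [List.reverse_cons, List.foldl_append, List.foldl_cons, List.foldl_nil, ih]
    rw [foldl_max_comm]

-- ===== VERDICT (by name: the statement is the Claim_ definition above) =====
theorem count_dna_spec : Claim_equal_count_dna := by
  intro sample dna _hdom hpre
  unfold Spec_count_dna
  by_cases hdna : dna = ""
  · subst hdna
    rcases hpre with h | h
    · exact absurd rfl h
    · subst h; rfl
  · have hd : dna.toList ≠ [] := fun h' => hdna (String.toList_eq_nil_iff.mp h')
    rw [A_val sample dna hd, B_val sample dna hd, foldl_max_reverse]
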